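-- pv_equiv track=rewrite | github.com/Pyk017/TCS_Xplore_Proctered_Assesments | TCS_DCA_Practice/Question07.py | findingAlphaNumeric
-- ===== SOURCE A (Python) =====
-- def findingAlphaNumeric(arr):
-- 	digits, words = 0, 0
-- 	for entry in arr:
-- 		if entry.isalpha():
-- 			words +=1
-- 		elif entry.isdigit():
-- 			digits += 1
-- 		else:
-- 			return None
--
-- 	return (digits, words)
-- ===== SOURCE B (Python) =====
-- def findingAlphaNumeric(arr):
--     # validate first, then count in two separate passes
--     if not all(e.isalpha() or e.isdigit() for e in arr):
--         return None
--     words = sum(1 for e in arr if e.isalpha())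
--     digits = sum(1 for e in arr if e.isdigit())
--     return (digits, words)
-- ===== Notes on version B (the rewrite author's own statement) =====
-- stated objective: simpler
-- what changed: Replaces the single three-way loop with a mid-iteration early return by a validation pass (all entries alpha-or-digit, else None) followed by two independent counting passes.
import Mathlib
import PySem

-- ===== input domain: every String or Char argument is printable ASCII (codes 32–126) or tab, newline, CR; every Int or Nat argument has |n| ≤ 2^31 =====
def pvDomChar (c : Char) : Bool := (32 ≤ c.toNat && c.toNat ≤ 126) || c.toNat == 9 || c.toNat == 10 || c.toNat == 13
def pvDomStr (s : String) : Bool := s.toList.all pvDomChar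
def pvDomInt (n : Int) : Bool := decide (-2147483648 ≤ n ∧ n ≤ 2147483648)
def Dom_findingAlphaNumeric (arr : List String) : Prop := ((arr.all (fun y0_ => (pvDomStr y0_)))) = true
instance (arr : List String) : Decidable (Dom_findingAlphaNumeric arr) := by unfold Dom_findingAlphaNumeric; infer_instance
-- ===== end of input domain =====

-- B replaces A's single three-way loop (early return mid-iteration) by a validate-then-count-twice decomposition; objective: simpler.


-- ===== PORT A =====
-- A's loop: fold over the entries with the two counters, returning None as soon as an
-- entry is neither alpha nor digit.
def findingAlphaNumericGo (arr : List String) (digits words : Int) : Option (Int × Int) :=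
  match arr with
  | [] => some (digits, words)
  | entry :: rest =>
    if PySem.Str.strIsalpha entry then findingAlphaNumericGo rest digits (words + 1)
    else if PySem.Str.strIsdigit entry then findingAlphaNumericGo rest (digits + 1) words
    else none

def findingAlphaNumeric (arr : List String) : Option (Int × Int) :=
  findingAlphaNumericGo arr 0 0

-- ===== PORT B =====
def findingAlphaNumeric_alt (arr : List String) : Option (Int × Int) :=
  if !(arr.all (fun e => PySem.Str.strIsalpha e || PySem.Str.strIsdigit e)) then none
  else
    let words : Int := (arr.countP (fun e => PySem.Str.strIsalpha e) : Int)
    let digits : Int := (arr.countP (fun e => PySem.Str.strIsdigit e) : Int)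
    some (digits, words)

-- ===== PRECONDITION & SPEC =====
def Spec_findingAlphaNumeric (arr : List String) (out : Option (Int × Int)) : Prop := out = findingAlphaNumeric_alt arr
instance (arr : List String) (out : Option (Int × Int)) : Decidable (Spec_findingAlphaNumeric arr out) := by unfold Spec_findingAlphaNumeric; infer_instance

-- ===== CLAIM (what is proved, stated in full; the proofs are below) =====
def Claim_equal_findingAlphaNumeric : Prop := ∀ (arr : List String), Dom_findingAlphaNumeric arr → Spec_findingAlphaNumeric arr (findingAlphaNumeric arr)

-- ===== LEMMAS AND PROOFS =====

-- A character cannot be both a letter and a digit.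
lemma char_alpha_not_digit (c : Char) (h : PySem.Chars.isalpha c = true) :
    PySem.Chars.isdigit c = false := by
  simp [PySem.Chars.isalpha, PySem.Chars.isupper, PySem.Chars.islower, PySem.Chars.isdigit,
        Char.le_def, UInt32.le_iff_toNat_le] at *
  rcases h with ⟨h1, h2⟩ | ⟨h1, h2⟩ <;> omega

-- A string cannot satisfy both isalpha() and isdigit().
lemma str_alpha_not_digit (s : String) (h : PySem.Str.strIsalpha s = true) :
    PySem.Str.strIsdigit s = false := by
  unfold PySem.Str.strIsalpha PySem.Str.strIsdigit PySem.Chars.strIsalpha PySem.Chars.strIsdigit at *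
  simp only [Bool.and_eq_true, List.all_eq_true] at h
  obtain ⟨hne, hall⟩ := h
  cases hs : s.toList with
  | nil => simp
  | cons c rest =>
    have hc : PySem.Chars.isalpha c = true := hall c (by rw [hs]; exact List.mem_cons_self ..)
    simp [char_alpha_not_digit c hc]

-- The loop of A computes B's counts shifted by the accumulators.
lemma go_eq_alt (arr : List String) : ∀ (d w : Int),
    findingAlphaNumericGo arr d w =
      (findingAlphaNumeric_alt arr).map (fun p => (d + p.1, w + p.2)) := by
  induction arr with
  | nil => intro d w; simp [findingAlphaNumericGo, findingAlphaNumeric_alt]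
  | cons e rest ih =>
    intro d w
    by_cases ha : PySem.Str.strIsalpha e = true
    · have hd := str_alpha_not_digit e ha
      simp only [findingAlphaNumericGo, ha, if_true, ih]
      simp only [findingAlphaNumeric_alt, List.all_cons, ha, hd, Bool.true_or, Bool.true_and,
        List.countP_cons]
      cases hall : rest.all (fun e => PySem.Str.strIsalpha e || PySem.Str.strIsdigit e) <;>
        simp [hall, ha, hd] <;> ring_nf
    · simp only [Bool.not_eq_true] at ha
      by_cases hdg : PySem.Str.strIsdigit e = true
      · simp only [findingAlphaNumericGo, ha, if_false, hdg, if_true, ih]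
        simp only [findingAlphaNumeric_alt, List.all_cons, ha, hdg, Bool.or_true, Bool.true_and,
          List.countP_cons]
        cases hall : rest.all (fun e => PySem.Str.strIsalpha e || PySem.Str.strIsdigit e) <;>
          simp [hall, ha, hdg] <;> ring_nf
      · simp only [Bool.not_eq_true] at hdg
        have hall : (e :: rest).all (fun e => PySem.Str.strIsalpha e || PySem.Str.strIsdigit e) = false := by
          simp only [List.all_cons, ha, hdg, Bool.or_self, Bool.false_and]
        simp only [findingAlphaNumericGo, ha, hdg, Bool.false_eq_true, if_false,
          findingAlphaNumeric_alt, hall, Bool.not_false, if_true, Option.map_none]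

-- ===== VERDICT (by name: the statement is the Claim_ definition above) =====
theorem findingAlphaNumeric_spec : Claim_equal_findingAlphaNumeric := by
  intro arr _
  unfold Spec_findingAlphaNumeric findingAlphaNumeric
  rw [go_eq_alt]
  cases h : findingAlphaNumeric_alt arr with
  | none => simp
  | some p => simp
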